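-- pv_equiv track=rewrite | github.com/anonydeepgraphlet/DeepGraphlet | src/utils.py | split_between_last_char
-- ===== SOURCE A (Python) =====
-- def split_between_last_char(path, ch):
--     items = path.split(ch)
--     ans = ""
--     for i in range(len(items) - 1):
--         ans += items[i]
--         if i != len(items) - 2:
--             ans += ch
--     return ans, items[-1]
-- ===== SOURCE B (Python) =====
-- def split_between_last_char(path, ch):
--     if not ch:
--         raise ValueError("empty separator")
--     last = -1
--     pos = 0
--     while True:
--         i = path.find(ch, pos)
--         if i < 0:
--             break
--         last = i
--         pos = i + len(ch)
--     if last < 0: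
--         return "", path
--     return path[:last], path[last + len(ch):]
-- ===== Notes on version B (the rewrite author's own statement) =====
-- stated objective: alternative
-- what changed: Instead of splitting the string into a list of pieces and re-assembling all but the last, B never materializes pieces: it scans once with str.find tracking the position of the last non-overlapping separator match and returns the two slices around it; Pre_ only excludes ch == '', where both programs raise ValueError.
import Mathlib
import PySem

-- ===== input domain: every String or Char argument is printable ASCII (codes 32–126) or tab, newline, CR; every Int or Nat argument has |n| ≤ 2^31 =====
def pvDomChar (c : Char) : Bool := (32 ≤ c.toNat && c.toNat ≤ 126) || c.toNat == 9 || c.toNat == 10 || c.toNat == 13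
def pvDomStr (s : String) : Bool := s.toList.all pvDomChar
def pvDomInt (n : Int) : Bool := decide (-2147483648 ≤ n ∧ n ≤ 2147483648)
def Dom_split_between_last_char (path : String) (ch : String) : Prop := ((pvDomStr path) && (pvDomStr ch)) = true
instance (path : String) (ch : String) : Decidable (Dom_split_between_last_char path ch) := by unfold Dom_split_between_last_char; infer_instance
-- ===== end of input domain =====

-- B replaces A's split-into-pieces-and-reassemble with a single find-scan that tracks the
-- last non-overlapping separator match and returns the two slices around it (alternative).

-- ===== PORT A =====
-- items = path.split(ch); ans = ""; for i in range(len(items) - 1): ans += items[i]; if i != len(items) - 2: ans += ch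
-- return ans, items[-1]   (ported on List Char; split? is none exactly where Python raises ValueError, excluded by Pre_)
def split_between_last_char (path : String) (ch : String) : String × String :=
  let items : List (List Char) := (PySem.Chars.split? path.toList ch.toList).getD []
  let n : Int := items.length
  let ans : List Char :=
    (PySem.List.pyRange 0 (n - 1)).foldl
      (fun acc i =>
        let acc := acc ++ PySem.List.pyGetD items i []
        if i ≠ n - 2 then acc ++ ch.toList else acc)
      []
  (String.ofList ans, String.ofList ((PySem.List.pyGet? items (-1)).getD []))

-- ===== PORT B =====
-- the while loop of Source B: i = path.find(ch, pos); if i < 0: break; last = i; pos = i + len(ch)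
-- (the fuel argument only makes the recursion total; for ch ≠ "" it never runs out)
def pvAltScan (s sep : List Char) : Nat → Nat → Int → Int
  | 0, _, last => last
  | fuel + 1, pos, last =>
    let i := PySem.Chars.findFrom s sep (pos : Int) none
    if i < 0 then last
    else pvAltScan s sep fuel (i.toNat + sep.length) i

-- if not ch: raise ValueError  (Python B raises there, excluded by Pre_; the port returns ("", path))
-- last = -1; pos = 0; while-loop; if last < 0: return "", path; return path[:last], path[last + len(ch):]
def split_between_last_char_alt (path : String) (ch : String) : String × String :=
  let s := path.toList
  let sep := ch.toList
  if sep.isEmpty then ("", path)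
  else
    let last := pvAltScan s sep (s.length + 1) 0 (-1)
    if last < 0 then ("", path)
    else (String.ofList (PySem.List.slice s none (some last)),
          String.ofList (PySem.List.slice s (some (last + sep.length)) none))

-- ===== PRECONDITION & SPEC =====
-- Python's split (in A) raises ValueError on an empty separator, and B raises ValueError there too; only ch = "" is excluded.
def Pre_split_between_last_char (path : String) (ch : String) : Prop := ch ≠ ""
instance (path : String) (ch : String) : Decidable (Pre_split_between_last_char path ch) := by unfold Pre_split_between_last_char; infer_instance
def pvWitness_split_between_last_char : String × String := ("a/b/c", "/")

def Spec_split_between_last_char (path : String) (ch : String) (out : String × String) : Prop := out = split_between_last_char_alt path ch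
instance (path : String) (ch : String) (out : String × String) : Decidable (Spec_split_between_last_char path ch out) := by unfold Spec_split_between_last_char; infer_instance

-- ===== CLAIM (what is proved, stated in full; the proofs are below) =====
def Claim_equal_split_between_last_char : Prop := ∀ (path : String) (ch : String), Dom_split_between_last_char path ch → Pre_split_between_last_char path ch → Spec_split_between_last_char path ch (split_between_last_char path ch)

-- ===== LEMMAS AND PROOFS =====

-- join with a sentinel appended: join sep (zs ++ [b]) = (each element of zs followed by sep) ++ b
lemma join_append_singleton (sep b : List Char) (zs : List (List Char)) :
    PySem.Chars.join sep (zs ++ [b]) = zs.flatMap (fun x => x ++ sep) ++ b := by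
  induction zs with
  | nil => simp [PySem.Chars.join_singleton]
  | cons z zs ih =>
    cases zs with
    | nil => simp [PySem.Chars.join_cons_cons, PySem.Chars.join_singleton]
    | cons w ws =>
      have h2 : (w :: ws) ++ [b] = w :: (ws ++ [b]) := rfl
      show PySem.Chars.join sep (z :: ((w :: ws) ++ [b])) = _
      rw [h2, PySem.Chars.join_cons_cons, ← h2, ih]
      simp

-- inner index loop over ys (separator after every element except the last) = join sep ys
lemma loop_join (sep : List Char) (ys : List (List Char)) :
    (PySem.List.pyRange 0 (ys.length : Int)).foldl
      (fun acc i =>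
        let acc := acc ++ PySem.List.pyGetD ys i []
        if i ≠ (ys.length : Int) - 1 then acc ++ sep else acc)
      [] = PySem.Chars.join sep ys := by
  induction ys using List.reverseRecOn with
  | nil => simp [PySem.List.pyRange, PySem.Chars.join_nil]
  | append_singleton zs b ih =>
    clear ih
    have hlen : ((zs ++ [b]).length : Int) = (zs.length : Int) + 1 := by simp
    rw [hlen, PySem.List.pyRange_one_succ_right (Int.natCast_nonneg _), List.foldl_append]
    have hpref :
        (PySem.List.pyRange 0 (zs.length : Int)).foldl
          (fun acc i =>
            let acc := acc ++ PySem.List.pyGetD (zs ++ [b]) i []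
            if i ≠ (zs.length : Int) + 1 - 1 then acc ++ sep else acc)
          [] = zs.flatMap (fun x => x ++ sep) := by
      rw [PySem.List.foldl_congr_mem _ _
            (fun acc i => (acc ++ PySem.List.pyGetD zs i []) ++ sep) _ ?_]
      · rw [PySem.List.foldl_pyRange_zero_pyGetD' zs [] (fun acc x => (acc ++ x) ++ sep) []]
        rw [PySem.List.foldl_congr_mem zs _ (fun acc x => acc ++ (x ++ sep)) []
              (by intro acc x _; simp)]
        simpa using PySem.List.foldl_append_eq_flatMap (fun x : List Char => x ++ sep) zs ([] : List Char)
      · intro acc i hi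
        rw [PySem.List.mem_pyRange_one] at hi
        have hne : i ≠ (zs.length : Int) + 1 - 1 := by omega
        have hget : PySem.List.pyGetD (zs ++ [b]) i [] = PySem.List.pyGetD zs i [] := by
          have h0 : 0 ≤ i := hi.1
          obtain ⟨k, rfl⟩ := Int.eq_ofNat_of_zero_le h0
          have hk : k < zs.length := by exact_mod_cast hi.2
          rw [PySem.List.pyGetD_natCast, PySem.List.pyGetD_natCast]
          simp [List.getD, List.getElem?_append_left hk]
        have hne' : ¬ i = (zs.length : Int) := by omega
        simp [hget, hne']
    rw [hpref]
    have hlast : ¬ ((zs.length : Int) ≠ (zs.length : Int) + 1 - 1) := by omega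
    have hgetb : PySem.List.pyGetD (zs ++ [b]) (zs.length : Int) [] = b := by
      rw [PySem.List.pyGetD_natCast]
      simp [List.getD]
    rw [List.foldl_cons, List.foldl_nil]
    simp only [hgetb, if_neg hlast]
    rw [join_append_singleton]

-- A's loop over items (range len-1, separator except at index len-2) = join sep items.dropLast
lemma loopA_eq (sep : List Char) (xs : List (List Char)) :
    (PySem.List.pyRange 0 ((xs.length : Int) - 1)).foldl
      (fun acc i =>
        let acc := acc ++ PySem.List.pyGetD xs i []
        if i ≠ (xs.length : Int) - 2 then acc ++ sep else acc)
      [] = PySem.Chars.join sep xs.dropLast := by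
  induction xs using List.reverseRecOn with
  | nil => simp [PySem.List.pyRange, PySem.Chars.join_nil]
  | append_singleton ys a ih =>
    clear ih
    have hlen : ((ys ++ [a]).length : Int) = (ys.length : Int) + 1 := by simp
    rw [hlen]
    have h1 : (ys.length : Int) + 1 - 1 = (ys.length : Int) := by ring
    rw [h1, List.dropLast_concat, ← loop_join sep ys]
    apply PySem.List.foldl_congr_mem
    intro acc i hi
    rw [PySem.List.mem_pyRange_one] at hi
    have hget : PySem.List.pyGetD (ys ++ [a]) i [] = PySem.List.pyGetD ys i [] := by
      obtain ⟨k, rfl⟩ := Int.eq_ofNat_of_zero_le hi.1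
      have hk : k < ys.length := by exact_mod_cast hi.2
      rw [PySem.List.pyGetD_natCast, PySem.List.pyGetD_natCast]
      simp [List.getD, hk, List.getElem?_append_left hk]
    have hiff : (i ≠ (ys.length : Int) + 1 - 2) ↔ (i ≠ (ys.length : Int) - 1) := by omega
    simp only [hget]
    by_cases hc : i ≠ (ys.length : Int) - 1
    · rw [if_pos (hiff.mpr hc), if_pos hc]
    · rw [if_neg (fun h => hc (hiff.mp h)), if_neg hc]

-- ---- first-occurrence facts about find ----

-- find is determined by "occurrence at k, none earlier"
lemma find_eq_of (s sub : List Char) (k : Nat)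
    (hk : sub <+: s.drop k) (hmin : ∀ i < k, ¬ sub <+: s.drop i) :
    PySem.Chars.find s sub = (k : Int) := by
  have hocc : PySem.Chars.find s sub ≠ -1 := by
    rw [PySem.Chars.find_ne_neg_one_iff, ← PySem.Chars.isIn_iff_infix,
      ← PySem.Chars.exists_prefix_drop_iff_isIn]
    exact ⟨k, hk⟩
  have h0 : 0 ≤ PySem.Chars.find s sub := by
    have := PySem.Chars.neg_one_le_find s sub
    omega
  obtain ⟨g, hg⟩ := Int.eq_ofNat_of_zero_le h0
  have hspec := PySem.Chars.find_spec h0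
  rw [hg] at hspec ⊢
  simp only [Int.toNat_natCast] at hspec
  rcases Nat.lt_trichotomy g k with h | h | h
  · exact absurd hspec.1 (hmin g h)
  · exact congrArg _ h
  · exact absurd hk (hspec.2 k h)

lemma find_nil_of_ne_nil (sub : List Char) (hsub : sub ≠ []) :
    PySem.Chars.find ([] : List Char) sub = -1 := by
  rw [PySem.Chars.find_eq_neg_one_iff]
  intro hinf
  exact hsub (List.infix_nil.mp hinf)

lemma find_cons_of_not_prefix (c : Char) (rest sub : List Char)
    (h : ¬ sub <+: (c :: rest)) :
    PySem.Chars.find (c :: rest) sub =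
      (if PySem.Chars.find rest sub = -1 then -1 else PySem.Chars.find rest sub + 1) := by
  by_cases hr : PySem.Chars.find rest sub = -1
  · rw [if_pos hr]
    rw [PySem.Chars.find_eq_neg_one_iff] at hr ⊢
    intro hinf
    apply hr
    rw [← PySem.Chars.isIn_iff_infix, ← PySem.Chars.exists_prefix_drop_iff_isIn] at hinf ⊢
    obtain ⟨j, hj⟩ := hinf
    cases j with
    | zero => exact absurd hj h
    | succ j => exact ⟨j, by simpa using hj⟩
  · rw [if_neg hr]
    have h0 : 0 ≤ PySem.Chars.find rest sub := by
      have := PySem.Chars.neg_one_le_find rest sub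
      omega
    obtain ⟨f, hf⟩ := Int.eq_ofNat_of_zero_le h0
    have hspec := PySem.Chars.find_spec h0
    rw [hf] at hspec
    simp only [Int.toNat_natCast] at hspec
    rw [hf]
    have : PySem.Chars.find (c :: rest) sub = ((f + 1 : Nat) : Int) := by
      apply find_eq_of
      · simpa using hspec.1
      · intro i hi
        cases i with
        | zero => exact h
        | succ i => intro hp; exact hspec.2 i (by omega) (by simpa using hp)
    rw [this]
    push_cast
    ring

-- a found occurrence splits the string into prefix ++ sep ++ rest
lemma decomp_of_prefix_drop (l sep : List Char) (k : Nat) (h : sep <+: l.drop k) :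
    l = l.take k ++ sep ++ l.drop (k + sep.length) := by
  obtain ⟨t, ht⟩ := h
  have h1 : l.drop (k + sep.length) = t := by
    rw [← List.drop_drop, ← ht]
    simp
  rw [h1]
  conv_lhs => rw [← List.take_append_drop k l, ← ht]
  simp

lemma take_decomp (u sep t : List Char) (m : Nat) :
    (u ++ sep ++ t).take (u.length + sep.length + m) = u ++ sep ++ t.take m := by
  rw [List.append_assoc, List.take_append, List.take_of_length_le (by omega),
    show u.length + sep.length + m - u.length = sep.length + m by omega,
    List.take_append, List.take_of_length_le (by omega),
    show sep.length + m - sep.length = m by omega, List.append_assoc]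

-- ---- the common recursive description: split at successive first occurrences ----

-- sor sep l characterizes l.split(sep) by first-occurrence recursion (proof-only helper)
def sor (sep l : List Char) : List (List Char) :=
  let f := PySem.Chars.find l sep
  if h : f = -1 ∨ sep = [] then [l]
  else l.take f.toNat :: sor sep (l.drop (f.toNat + sep.length))
termination_by l.length
decreasing_by
  push_neg at h
  have hocc : sep <:+: l := (PySem.Chars.find_ne_neg_one_iff l sep).mp h.1
  have hl : l ≠ [] := by
    intro hnil
    rw [hnil] at hocc
    exact h.2 (List.infix_nil.mp hocc)
  have h1 : 1 ≤ sep.length := List.length_pos_iff.mpr h.2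
  have h2 : 1 ≤ l.length := List.length_pos_iff.mpr hl
  simp only [List.length_drop]
  omega

-- li sep l = position of the last non-overlapping left-to-right match (-1 if none; proof-only helper)
def li (sep l : List Char) : Int :=
  let f := PySem.Chars.find l sep
  if h : f = -1 ∨ sep = [] then -1
  else
    let r := li sep (l.drop (f.toNat + sep.length))
    if r = -1 then f else f + sep.length + r
termination_by l.length
decreasing_by
  push_neg at h
  have hocc : sep <:+: l := (PySem.Chars.find_ne_neg_one_iff l sep).mp h.1
  have hl : l ≠ [] := by
    intro hnil
    rw [hnil] at hocc
    exact h.2 (List.infix_nil.mp hocc)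
  have h1 : 1 ≤ sep.length := List.length_pos_iff.mpr h.2
  have h2 : 1 ≤ l.length := List.length_pos_iff.mpr hl
  simp only [List.length_drop]
  omega

lemma sor_ne_nil (sep l : List Char) : sor sep l ≠ [] := by
  rw [sor]
  split <;> simp

lemma headI_cons_tail {α : Type} [Inhabited α] (xs : List α) (h : xs ≠ []) :
    xs.headI :: xs.tail = xs := by
  cases xs with
  | nil => exact absurd rfl h
  | cons a t => rfl

lemma li_nonneg_of_ne (sep l : List Char) : li sep l ≠ -1 → 0 ≤ li sep l := by
  fun_induction li sep l with
  | case1 l f hf => intro h; exact absurd rfl h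
  | case2 l f hf r hr ih =>
    intro _
    have h1 := PySem.Chars.neg_one_le_find l sep
    have hf1 : PySem.Chars.find l sep ≠ -1 := fun h => hf (Or.inl h)
    omega
  | case3 l f hf r hr ih =>
    intro _
    have h1 := PySem.Chars.neg_one_le_find l sep
    have hf1 : PySem.Chars.find l sep ≠ -1 := fun h => hf (Or.inl h)
    have h2 := ih hr
    have h3 : (0 : Int) ≤ sep.length := by positivity
    omega

lemma li_eq_neg_one_iff (sep l : List Char) (hsep : sep ≠ []) :
    li sep l = -1 ↔ PySem.Chars.find l sep = -1 := by
  fun_induction li sep l with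
  | case1 l f hf =>
    rcases hf with hf | hf
    · simpa using hf
    · exact absurd hf hsep
  | case2 l f hf r hr ih =>
    have hf1 : PySem.Chars.find l sep ≠ -1 := fun h => hf (Or.inl h)
    constructor
    · intro h; exact absurd h hf1
    · intro h; exact absurd h hf1
  | case3 l f hf r hr ih =>
    have hf1 : PySem.Chars.find l sep ≠ -1 := fun h => hf (Or.inl h)
    have h1 := PySem.Chars.neg_one_le_find l sep
    have h2 := li_nonneg_of_ne _ _ hr
    have h3 : (0 : Int) ≤ sep.length := by positivity
    constructor
    · intro h; omega
    · intro h; exact absurd h hf1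

-- splitOn.go's accumulator semantics: it computes sor of the remaining input
lemma go_eq_sor (sep : List Char) (hsep : sep ≠ []) :
    ∀ (fuel : Nat) (l cur : List Char) (acc : List (List Char)), l.length ≤ fuel →
      PySem.Chars.splitOn.go sep fuel l cur acc =
        acc.reverse ++ ((cur.reverse ++ (sor sep l).headI) :: (sor sep l).tail) := by
  intro fuel
  induction fuel with
  | zero =>
    intro l cur acc hlen
    have hl : l = [] := List.length_eq_zero_iff.mp (Nat.le_zero.mp hlen)
    subst hl
    rw [PySem.Chars.splitOn.go, sor]
    simp [find_nil_of_ne_nil sep hsep]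
  | succ fuel ih =>
    intro l cur acc hlen
    cases l with
    | nil =>
      rw [show PySem.Chars.splitOn.go sep (fuel + 1) [] cur acc = (cur.reverse :: acc).reverse
          from rfl]
      rw [sor]
      simp [find_nil_of_ne_nil sep hsep]
    | cons c rest =>
      rw [show PySem.Chars.splitOn.go sep (fuel + 1) (c :: rest) cur acc =
          (if sep.isPrefixOf (c :: rest) = true then
            PySem.Chars.splitOn.go sep fuel (List.drop sep.length (c :: rest)) []
              (cur.reverse :: acc)
          else PySem.Chars.splitOn.go sep fuel rest (c :: cur) acc) from rfl]
      by_cases hp : sep.isPrefixOf (c :: rest)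
      · rw [if_pos hp]
        have hpre : sep <+: (c :: rest) := List.isPrefixOf_iff_prefix.mp hp
        have h1 : 1 ≤ sep.length := List.length_pos_iff.mpr hsep
        have hlen' : ((c :: rest).drop sep.length).length ≤ fuel := by
          simp only [List.length_drop, List.length_cons] at *
          omega
        rw [ih _ _ _ hlen']
        have hfind : PySem.Chars.find (c :: rest) sep = (0 : Int) := by
          have := find_eq_of (c :: rest) sep 0 (by simpa using hpre) (by intro i hi; omega)
          simpa using this
        conv_rhs => rw [sor]
        rw [dif_neg (by rw [hfind]; simp [hsep])]
        rw [hfind]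
        simp only [Int.toNat_zero, List.take_zero, List.drop_drop]
        simp [headI_cons_tail _ (sor_ne_nil _ _)]
      · rw [if_neg hp]
        have hlen' : rest.length ≤ fuel := by
          simp at hlen
          omega
        rw [ih _ _ _ hlen']
        have hnp : ¬ sep <+: (c :: rest) := fun h => hp (List.isPrefixOf_iff_prefix.mpr h)
        have hcons := find_cons_of_not_prefix c rest sep hnp
        by_cases hr : PySem.Chars.find rest sep = -1
        · have hfc : PySem.Chars.find (c :: rest) sep = -1 := by rw [hcons, if_pos hr]
          have h1 : sor sep (c :: rest) = [c :: rest] := by rw [sor]; simp [hfc]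
          have h2 : sor sep rest = [rest] := by rw [sor]; simp [hr]
          rw [h1, h2]
          simp
        · have h0 : 0 ≤ PySem.Chars.find rest sep := by
            have := PySem.Chars.neg_one_le_find rest sep
            omega
          obtain ⟨f, hf⟩ := Int.eq_ofNat_of_zero_le h0
          have hfc : PySem.Chars.find (c :: rest) sep = ((f + 1 : Nat) : Int) := by
            rw [hcons, if_neg hr, hf]
            push_cast
            ring
          have hA : sor sep (c :: rest) =
              (c :: rest.take f) :: sor sep (rest.drop (f + sep.length)) := by
            conv_lhs => rw [sor]
            rw [dif_neg (by rw [hfc]; simp [hsep]; try omega)]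
            rw [hfc]
            simp only [Int.toNat_natCast, List.take_succ_cons]
            congr 2
            rw [show f + 1 + sep.length = (f + sep.length) + 1 by ring, List.drop_succ_cons]
          have hB : sor sep rest = rest.take f :: sor sep (rest.drop (f + sep.length)) := by
            conv_lhs => rw [sor]
            rw [dif_neg (by rw [hf]; simp [hsep]; try omega)]
            rw [hf]
            simp only [Int.toNat_natCast]
          rw [hA, hB]
          simp

lemma splitOn_eq_sor (s sep : List Char) (hsep : sep ≠ []) :
    PySem.Chars.splitOn s sep = sor sep s := by
  rw [PySem.Chars.splitOn, go_eq_sor sep hsep _ _ _ _ (by omega)]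
  simp [headI_cons_tail _ (sor_ne_nil sep s)]

-- the partition identity: join of all pieces but the last = take (li), last piece = drop (li + |sep|)
lemma sor_partition (sep : List Char) (hsep : sep ≠ []) (l : List Char) :
    li sep l ≠ -1 →
      PySem.Chars.join sep (sor sep l).dropLast = l.take (li sep l).toNat ∧
      (sor sep l).getLastD [] = l.drop ((li sep l).toNat + sep.length) := by
  fun_induction li sep l with
  | case1 l f hf => intro h; exact absurd rfl h
  | case2 l f hf r hr ih =>
    intro _
    have hf1 : PySem.Chars.find l sep ≠ -1 := fun h => hf (Or.inl h)
    have hsor : sor sep l =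
        l.take (PySem.Chars.find l sep).toNat ::
          sor sep (l.drop ((PySem.Chars.find l sep).toNat + sep.length)) := by
      conv_lhs => rw [sor]
      rw [dif_neg (by simp [hsep, hf1])]
    have hsub : sor sep (l.drop ((PySem.Chars.find l sep).toNat + sep.length)) =
        [l.drop ((PySem.Chars.find l sep).toNat + sep.length)] := by
      rw [sor, dif_pos (Or.inl ((li_eq_neg_one_iff sep _ hsep).mp hr))]
    rw [hsor, hsub]
    refine ⟨?_, ?_⟩
    · simp only [List.dropLast_cons_of_ne_nil (by simp : ([l.drop ((PySem.Chars.find l sep).toNat + sep.length)] : List (List Char)) ≠ [])]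
      simp [PySem.Chars.join_singleton]
      rfl
    · simp
      try rfl
  | case3 l f hf r hr ih =>
    intro _
    have hf1 : PySem.Chars.find l sep ≠ -1 := fun h => hf (Or.inl h)
    have hf0 : 0 ≤ PySem.Chars.find l sep := by
      have := PySem.Chars.neg_one_le_find l sep
      omega
    have hr' : li sep (l.drop ((PySem.Chars.find l sep).toNat + sep.length)) ≠ -1 := hr
    obtain ⟨ih1, ih2⟩ := ih hr'
    have hr0 : 0 ≤ li sep (l.drop ((PySem.Chars.find l sep).toNat + sep.length)) :=
      li_nonneg_of_ne _ _ hr'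
    have hsor : sor sep l =
        l.take (PySem.Chars.find l sep).toNat ::
          sor sep (l.drop ((PySem.Chars.find l sep).toNat + sep.length)) := by
      conv_lhs => rw [sor]
      rw [dif_neg (by simp [hsep, hf1])]
    have hfsub : PySem.Chars.find (l.drop ((PySem.Chars.find l sep).toNat + sep.length)) sep ≠ -1 :=
      fun h => hr' ((li_eq_neg_one_iff sep _ hsep).mpr h)
    have hsublen : 2 ≤ (sor sep (l.drop ((PySem.Chars.find l sep).toNat + sep.length))).length := by
      rw [sor, dif_neg (by simp [hsep, hfsub])]
      have := sor_ne_nil sep ((l.drop ((PySem.Chars.find l sep).toNat + sep.length)).drop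
        ((PySem.Chars.find (l.drop ((PySem.Chars.find l sep).toNat + sep.length)) sep).toNat + sep.length))
      cases hs : sor sep ((l.drop ((PySem.Chars.find l sep).toNat + sep.length)).drop
        ((PySem.Chars.find (l.drop ((PySem.Chars.find l sep).toNat + sep.length)) sep).toNat + sep.length)) with
      | nil => exact absurd hs this
      | cons a t => simp
    obtain ⟨a, ys, hay⟩ : ∃ a ys,
        (sor sep (l.drop ((PySem.Chars.find l sep).toNat + sep.length))).dropLast = a :: ys := by
      have hlen : 1 ≤ (sor sep (l.drop ((PySem.Chars.find l sep).toNat + sep.length))).dropLast.length := by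
        rw [List.length_dropLast]
        omega
      cases hs : (sor sep (l.drop ((PySem.Chars.find l sep).toNat + sep.length))).dropLast with
      | nil => rw [hs] at hlen; simp at hlen
      | cons a t => exact ⟨a, t, rfl⟩
    have hpre : sep <+: l.drop (PySem.Chars.find l sep).toNat := (PySem.Chars.find_spec hf0).1
    have hdec := decomp_of_prefix_drop l sep (PySem.Chars.find l sep).toNat hpre
    have hlentake : (l.take (PySem.Chars.find l sep).toNat).length = (PySem.Chars.find l sep).toNat := by
      have hle : PySem.Chars.find l sep ≤ (l.length : Int) := PySem.Chars.find_le_length l sep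
      simp only [List.length_take]
      omega
    have htoNat : (PySem.Chars.find l sep + (sep.length : Int) +
        li sep (l.drop ((PySem.Chars.find l sep).toNat + sep.length))).toNat =
        (PySem.Chars.find l sep).toNat + sep.length +
          (li sep (l.drop ((PySem.Chars.find l sep).toNat + sep.length))).toNat := by
      omega
    have hRHS : l.take ((PySem.Chars.find l sep).toNat + sep.length +
        (li sep (l.drop ((PySem.Chars.find l sep).toNat + sep.length))).toNat) =
        l.take (PySem.Chars.find l sep).toNat ++ sep ++
          (l.drop ((PySem.Chars.find l sep).toNat + sep.length)).take
            (li sep (l.drop ((PySem.Chars.find l sep).toNat + sep.length))).toNat := by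
      have h2 : l.take ((PySem.Chars.find l sep).toNat + sep.length +
          (li sep (l.drop ((PySem.Chars.find l sep).toNat + sep.length))).toNat) =
          (l.take (PySem.Chars.find l sep).toNat ++ sep ++
            l.drop ((PySem.Chars.find l sep).toNat + sep.length)).take
            ((PySem.Chars.find l sep).toNat + sep.length +
              (li sep (l.drop ((PySem.Chars.find l sep).toNat + sep.length))).toNat) := by
        rw [← hdec]
      rw [h2, show (PySem.Chars.find l sep).toNat + sep.length +
          (li sep (l.drop ((PySem.Chars.find l sep).toNat + sep.length))).toNat =
          (l.take (PySem.Chars.find l sep).toNat).length + sep.length +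
            (li sep (l.drop ((PySem.Chars.find l sep).toNat + sep.length))).toNat by
        rw [hlentake], take_decomp]
    constructor
    · rw [hsor, List.dropLast_cons_of_ne_nil (sor_ne_nil sep _), hay,
        PySem.Chars.join_cons_cons, ← hay, ih1, htoNat, hRHS]
    · rw [hsor, htoNat]
      have h1 : (l.take (PySem.Chars.find l sep).toNat ::
          sor sep (l.drop ((PySem.Chars.find l sep).toNat + sep.length))).getLastD [] =
          (sor sep (l.drop ((PySem.Chars.find l sep).toNat + sep.length))).getLastD [] := by
        cases hs : sor sep (l.drop ((PySem.Chars.find l sep).toNat + sep.length)) with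
        | nil => exact absurd hs (sor_ne_nil _ _)
        | cons x t => simp [List.getLastD]
      rw [h1, ih2, List.drop_drop]
      congr 1
      ring

-- B's scan loop computes li of the unscanned suffix (offset by pos)
lemma scan_eq (s sep : List Char) (hsep : sep ≠ []) :
    ∀ (fuel pos : Nat) (last : Int), pos ≤ s.length → s.length + 1 - pos ≤ fuel →
      pvAltScan s sep fuel pos last =
        if li sep (s.drop pos) = -1 then last else (pos : Int) + li sep (s.drop pos) := by
  intro fuel
  induction fuel with
  | zero =>
    intro pos last hpos hfuel
    omega
  | succ fuel ih =>
    intro pos last hpos hfuel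
    rw [pvAltScan]
    simp only [PySem.Chars.findFrom_natCast s sep pos hpos]
    by_cases hfind : PySem.Chars.find (s.drop pos) sep = -1
    · rw [if_pos hfind]
      have : ((-1 : Int) < 0) = True := by simp
      rw [if_pos (by norm_num), if_pos ((li_eq_neg_one_iff sep _ hsep).mpr hfind)]
    · rw [if_neg hfind]
      have hf0 : 0 ≤ PySem.Chars.find (s.drop pos) sep := by
        have := PySem.Chars.neg_one_le_find (s.drop pos) sep
        omega
      have hnotlt : ¬ ((pos : Int) + PySem.Chars.find (s.drop pos) sep < 0) := by omega
      rw [if_neg hnotlt]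
      have hpre : sep <+: (s.drop pos).drop (PySem.Chars.find (s.drop pos) sep).toNat :=
        (PySem.Chars.find_spec hf0).1
      have hL : 1 ≤ sep.length := List.length_pos_iff.mpr hsep
      have hfit : (PySem.Chars.find (s.drop pos) sep).toNat + sep.length ≤ s.length - pos := by
        have h2 := hpre.length_le
        simp only [List.length_drop] at h2
        omega
      have htn : ((pos : Int) + PySem.Chars.find (s.drop pos) sep).toNat =
          pos + (PySem.Chars.find (s.drop pos) sep).toNat := by
        omega
      rw [htn]
      have hpos' : pos + (PySem.Chars.find (s.drop pos) sep).toNat + sep.length ≤ s.length := by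
        omega
      have hfuel' : s.length + 1 - (pos + (PySem.Chars.find (s.drop pos) sep).toNat + sep.length) ≤ fuel := by
        omega
      rw [ih _ _ hpos' hfuel']
      have hdd : s.drop (pos + (PySem.Chars.find (s.drop pos) sep).toNat + sep.length) =
          (s.drop pos).drop ((PySem.Chars.find (s.drop pos) sep).toNat + sep.length) := by
        rw [List.drop_drop]
        congr 1
        ring
      rw [hdd]
      have hli : li sep (s.drop pos) =
          if li sep ((s.drop pos).drop ((PySem.Chars.find (s.drop pos) sep).toNat + sep.length)) = -1
          then PySem.Chars.find (s.drop pos) sep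
          else PySem.Chars.find (s.drop pos) sep + sep.length +
            li sep ((s.drop pos).drop ((PySem.Chars.find (s.drop pos) sep).toNat + sep.length)) := by
        conv_lhs => rw [li]
        rw [dif_neg (by simp [hsep, hfind])]
      by_cases hr : li sep ((s.drop pos).drop ((PySem.Chars.find (s.drop pos) sep).toNat + sep.length)) = -1
      · rw [if_pos hr, hli, if_pos hr, if_neg (by omega)]
      · have hr0 := li_nonneg_of_ne _ _ hr
        rw [if_neg hr, hli, if_neg hr, if_neg (by omega)]
        push_cast
        omega

-- items[-1] of a nonempty list is its last element
lemma pyGet_neg_one (xs : List (List Char)) (h : xs ≠ []) :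
    (PySem.List.pyGet? xs (-1)).getD [] = xs.getLastD [] := by
  have hlen : 1 ≤ xs.length := List.length_pos_iff.mpr h
  have hidx : PySem.List.pyIdx? xs.length (-1) = some (xs.length - 1) := by
    rw [PySem.List.pyIdx?]
    rw [if_neg (by omega), if_pos (by omega)]
    rfl
  rw [PySem.List.pyGet?, hidx, Option.bind_some]
  rw [List.getElem?_eq_getElem (by omega)]
  rw [Option.getD_some]
  rw [List.getLastD_eq_getLast?, List.getLast?_eq_getElem?,
    List.getElem?_eq_getElem (by omega), Option.getD_some]

-- ===== VERDICT (by name: the statement is the Claim_ definition above) =====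
theorem split_between_last_char_spec : Claim_equal_split_between_last_char := by
  intro path ch _ hpre
  unfold Spec_split_between_last_char split_between_last_char split_between_last_char_alt
  have hsep : ch.toList ≠ [] := fun h => hpre (String.toList_eq_nil_iff.mp h)
  have hch : ch.toList.isEmpty = false := by
    cases h : ch.toList with
    | nil => exact absurd h hsep
    | cons c cs => rfl
  simp only [PySem.Chars.split?, hch, Bool.false_eq_true, if_false, Option.getD_some]
  rw [splitOn_eq_sor _ _ hsep, loopA_eq, pyGet_neg_one _ (sor_ne_nil _ _)]
  rw [scan_eq path.toList ch.toList hsep (path.toList.length + 1) 0 (-1) (by omega) (by omega)]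
  simp only [List.drop_zero, Nat.cast_zero]
  by_cases hli : li ch.toList path.toList = -1
  · rw [if_pos hli]
    rw [if_pos (by norm_num)]
    have hfind : PySem.Chars.find path.toList ch.toList = -1 :=
      (li_eq_neg_one_iff _ _ hsep).mp hli
    have hsor : sor ch.toList path.toList = [path.toList] := by
      rw [sor, dif_pos (Or.inl hfind)]
    rw [hsor]
    rw [Prod.mk.injEq]
    refine ⟨rfl, by simp⟩
  · have hli0 : 0 ≤ li ch.toList path.toList := li_nonneg_of_ne _ _ hli
    rw [if_neg hli]
    rw [if_neg (by omega)]
    obtain ⟨hp1, hp2⟩ := sor_partition ch.toList hsep path.toList hli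
    rw [PySem.List.slice_to _ (by omega), PySem.List.slice_from _ (by positivity)]
    rw [show ((0 : Int) + li ch.toList path.toList) = li ch.toList path.toList by ring]
    rw [hp1, hp2]
    rw [show (li ch.toList path.toList + (ch.toList.length : Int)).toNat =
      (li ch.toList path.toList).toNat + ch.toList.length by omega]
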